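-- pv_equiv track=rewrite | github.com/mMyst/adel | adel/plantgen/axeT.py | _gen_index_plt_list
-- ===== SOURCE A (Python) =====
-- def _gen_index_plt_list(plant_ids, index_axis_list):
--     '''Generate the *id_plt* column.'''
--     index_plt_list = []
--     current_plant_index = 0
--     for plant_id in plant_ids:
--         start_index = current_plant_index + 1
--         if 1 in index_axis_list[start_index:]:
--             next_plant_first_row = index_axis_list.index(1, start_index)
--         else:
--             next_plant_first_row = len(index_axis_list)
--         current_plant_axes = index_axis_list[current_plant_index:next_plant_first_row]
--         index_plt_list.extend([plant_id for current_plant_axis in current_plant_axes])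
--         current_plant_index = next_plant_first_row
--     return index_plt_list
-- ===== SOURCE B (Python) =====
-- def _gen_index_plt_list(plant_ids, index_axis_list):
--     '''Generate the *id_plt* column (row-driven: one walk over the axis rows,
--     tracking the current plant index; stops when the plants are exhausted).'''
--     out = []
--     k = 0
--     n_plants = len(plant_ids)
--     for i, value in enumerate(index_axis_list):
--         if i > 0 and value == 1:
--             k += 1
--         if k >= n_plants:
--             break
--         out.append(plant_ids[k])
--     return out
-- ===== Notes on version B (the rewrite author's own statement) =====
-- stated objective: faster
-- what changed: A is plant-driven: for each plant it rescans the axis list (membership test on a slice, list.index, a slice copy) and expands a whole segment at once; B is row-driven: a single walk over the axis rows emitting one id per row, bumping the current plant index whenever a row's index is 1, with no searches, slices or segment expansion.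
import Mathlib
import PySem

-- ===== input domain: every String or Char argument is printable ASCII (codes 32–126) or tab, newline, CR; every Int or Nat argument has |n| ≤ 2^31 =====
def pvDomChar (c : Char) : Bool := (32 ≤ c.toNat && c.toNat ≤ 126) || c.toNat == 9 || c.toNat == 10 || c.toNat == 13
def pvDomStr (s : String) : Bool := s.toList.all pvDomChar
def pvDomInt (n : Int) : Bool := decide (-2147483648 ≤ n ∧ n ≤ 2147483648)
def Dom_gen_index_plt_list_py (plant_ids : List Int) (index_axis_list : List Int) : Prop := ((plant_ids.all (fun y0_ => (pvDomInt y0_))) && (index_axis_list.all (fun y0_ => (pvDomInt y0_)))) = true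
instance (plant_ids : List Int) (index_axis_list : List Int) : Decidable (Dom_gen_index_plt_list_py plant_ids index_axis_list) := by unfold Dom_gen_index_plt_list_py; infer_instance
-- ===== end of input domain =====

-- A expands one whole segment per plant, rescanning the axis list each time; B instead walks the
-- axis rows once, emitting one id per row and advancing the plant index at each row equal to 1:
-- objective 'faster' (O(P·N) → O(N)).

-- ===== PORT A =====
-- one loop iteration of A; `xs.index(1, start)` is ported exactly as start + first index of 1 in xs[start:]
def pvAStep (xs : List Int) (st : List Int × Nat) (plant_id : Int) : List Int × Nat :=
  let cur := st.2
  let start := cur + 1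
  let tail := PySem.List.slice xs (some (start : Int)) none
  let next : Nat := if (1 : Int) ∈ tail then start + ((PySem.List.index? tail 1).getD 0)
                    else xs.length
  let seg := PySem.List.slice xs (some (cur : Int)) (some (next : Int))
  (st.1 ++ seg.map (fun _ => plant_id), next)

def gen_index_plt_list_py (plant_ids : List Int) (index_axis_list : List Int) : List Int :=
  (plant_ids.foldl (pvAStep index_axis_list) ([], 0)).1

-- ===== PORT B =====
-- B's single row loop: k is the current plant index; a row with index 1 (past row 0) bumps it,
-- the loop stops as soon as k runs past the plants, otherwise the row emits plant_ids[k]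
def pvBLoop (pids : List Int) (rows : List (Int × Nat)) (k : Nat) : List Int :=
  match rows with
  | [] => []
  | (v, i) :: rest =>
    let k' := if 0 < i ∧ v = 1 then k + 1 else k
    if k' < pids.length then pids.getD k' 0 :: pvBLoop pids rest k' else []

def gen_index_plt_list_py_alt (plant_ids : List Int) (index_axis_list : List Int) : List Int :=
  pvBLoop plant_ids (index_axis_list.zipIdx 0) 0

-- ===== PRECONDITION & SPEC =====
def Spec_gen_index_plt_list_py (plant_ids : List Int) (index_axis_list : List Int) (out : List Int) : Prop := out = gen_index_plt_list_py_alt plant_ids index_axis_list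
instance (plant_ids : List Int) (index_axis_list : List Int) (out : List Int) : Decidable (Spec_gen_index_plt_list_py plant_ids index_axis_list out) := by unfold Spec_gen_index_plt_list_py; infer_instance

-- ===== CLAIM (what is proved, stated in full; the proofs are below) =====
def Claim_equal_gen_index_plt_list_py : Prop := ∀ (plant_ids : List Int) (index_axis_list : List Int), Dom_gen_index_plt_list_py plant_ids index_axis_list → Spec_gen_index_plt_list_py plant_ids index_axis_list (gen_index_plt_list_py plant_ids index_axis_list)

-- ===== LEMMAS AND PROOFS =====

-- segment-shaped intermediate form of A's output (proof-only helper)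
def pvAltLoop (pids : List Int) (ones : List Nat) (cur n : Nat) : List Int :=
  match pids, ones with
  | [], _ => []
  | pid :: rest, o :: os => List.replicate (o - cur) pid ++ pvAltLoop rest os o n
  | pid :: rest, [] => List.replicate (n - cur) pid ++ pvAltLoop rest [] n n

-- positions of 1 in l, counting from i
def pvOnes : List Int → Nat → List Nat
  | [], _ => []
  | x :: t, i => if x = 1 then i :: pvOnes t (i + 1) else pvOnes t (i + 1)

lemma pvOnes_of_not_mem {l : List Int} (i : Nat) (h : (1 : Int) ∉ l) : pvOnes l i = [] := by
  induction l generalizing i with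
  | nil => rfl
  | cons x t ih =>
    simp only [List.mem_cons, not_or] at h
    simp [pvOnes, Ne.symm h.1, ih _ h.2]

lemma pvOnes_of_mem {l : List Int} (i : Nat) (h : (1 : Int) ∈ l) :
    pvOnes l i = (i + l.idxOf 1) :: pvOnes (l.drop (l.idxOf 1 + 1)) (i + l.idxOf 1 + 1) := by
  induction l generalizing i with
  | nil => cases h
  | cons x t ih =>
    by_cases hx : x = 1
    · simp [pvOnes, hx, List.idxOf_cons_self]
    · have ht : (1 : Int) ∈ t := by
        rcases List.mem_cons.mp h with h1 | h1
        · exact absurd h1.symm hx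
        · exact h1
      have hidx : (x :: t).idxOf 1 = t.idxOf 1 + 1 := by
        simp [hx]
      rw [pvOnes, if_neg hx, ih _ ht, hidx]
      simp [Nat.add_comm, Nat.add_left_comm]

lemma pvOnes_ge {l : List Int} : ∀ {i o : Nat}, o ∈ pvOnes l i → i ≤ o := by
  induction l with
  | nil => intro i o h; cases h
  | cons x t ih =>
    intro i o h
    by_cases hx : x = 1
    · rw [pvOnes, if_pos hx] at h
      rcases List.mem_cons.mp h with h1 | h1
      · omega
      · have := ih h1; omega
    · rw [pvOnes, if_neg hx] at h
      have := ih h; omega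

lemma pv_idxOf?_of_mem : ∀ {l : List Int} (a : Int), a ∈ l → l.idxOf? a = some (l.idxOf a) := by
  intro l
  induction l with
  | nil => intro a h; cases h
  | cons x t ih =>
    intro a h
    by_cases hx : x = a
    · simp [List.idxOf?_cons, hx]
    · have ht : a ∈ t := by
        rcases List.mem_cons.mp h with h1 | h1
        · exact absurd h1.symm hx
        · exact h1
      simp [List.idxOf?_cons, hx, ih a ht]

-- the boundary A's search computes from position cur
def pvNext (xs : List Int) (cur : Nat) : Nat :=
  if (1 : Int) ∈ xs.drop (cur + 1) then cur + 1 + (xs.drop (cur + 1)).idxOf 1 else xs.length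

-- the value of one iteration of A's loop, as replicate + the next boundary
lemma pvAStep_eq (xs : List Int) (acc : List Int) (cur : Nat) (p : Int) (hcur : cur ≤ xs.length) :
    pvAStep xs (acc, cur) p =
      (acc ++ List.replicate (pvNext xs cur - cur) p, pvNext xs cur) := by
  have htail : PySem.List.slice xs (some ((cur + 1 : Nat) : Int)) none = xs.drop (cur + 1) :=
    PySem.List.slice_from_natCast xs (cur + 1)
  simp only [pvAStep, htail, PySem.List.index?_eq_idxOf?, PySem.List.slice_natCast,
    List.map_const']
  by_cases hmem : (1 : Int) ∈ xs.drop (cur + 1)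
  · have hk : (xs.drop (cur + 1)).idxOf 1 < xs.length - (cur + 1) := by
      have := List.idxOf_lt_length_of_mem hmem
      simpa using this
    have hnext : pvNext xs cur = cur + 1 + (xs.drop (cur + 1)).idxOf 1 := by
      simp [pvNext, hmem]
    rw [if_pos hmem, pv_idxOf?_of_mem 1 hmem, Option.getD_some, hnext]
    refine Prod.ext ?_ rfl
    simp only [List.length_take, List.length_drop]
    rw [Nat.min_eq_left (by omega)]
  · have hnext : pvNext xs cur = xs.length := by simp [pvNext, hmem]
    rw [if_neg hmem, hnext]
    refine Prod.ext ?_ rfl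
    simp only [List.length_take, List.length_drop]
    rw [Nat.min_self]

lemma pv_foldA_acc (xs : List Int) (pids : List Int) :
    ∀ (acc : List Int) (cur : Nat),
      pids.foldl (pvAStep xs) (acc, cur) =
        (acc ++ (pids.foldl (pvAStep xs) ([], cur)).1, (pids.foldl (pvAStep xs) ([], cur)).2) := by
  induction pids with
  | nil => intro acc cur; simp
  | cons p rest ih =>
    intro acc cur
    simp only [List.foldl_cons]
    obtain ⟨s1, s2, hs⟩ : ∃ s1 s2, pvAStep xs ([], cur) p = (s1, s2) := ⟨_, _, rfl⟩
    have hstep : pvAStep xs (acc, cur) p = (acc ++ s1, s2) := by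
      have : (pvAStep xs (acc, cur) p).1 = acc ++ (pvAStep xs ([], cur) p).1 ∧
             (pvAStep xs (acc, cur) p).2 = (pvAStep xs ([], cur) p).2 := by
        constructor <;> simp [pvAStep]
      rw [hs] at this
      exact Prod.ext this.1 this.2
    rw [hstep, hs, ih (acc ++ s1) s2, ih s1 s2, List.append_assoc]

lemma pv_loopA (xs : List Int) (pids : List Int) :
    ∀ cur : Nat, cur ≤ xs.length →
      (pids.foldl (pvAStep xs) ([], cur)).1 =
        pvAltLoop pids (pvOnes (xs.drop (cur + 1)) (cur + 1)) cur xs.length := by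
  induction pids with
  | nil => intro cur _; simp [pvAltLoop]
  | cons p rest ih =>
    intro cur hcur
    simp only [List.foldl_cons]
    rw [pvAStep_eq xs [] cur p hcur, List.nil_append, pv_foldA_acc]
    by_cases hmem : (1 : Int) ∈ xs.drop (cur + 1)
    · have hk : (xs.drop (cur + 1)).idxOf 1 < xs.length - (cur + 1) := by
        have := List.idxOf_lt_length_of_mem hmem
        simpa using this
      have hnext : pvNext xs cur = cur + 1 + (xs.drop (cur + 1)).idxOf 1 := by
        simp [pvNext, hmem]
      have hle : pvNext xs cur ≤ xs.length := by omega
      have hdd : (xs.drop (cur + 1)).drop ((xs.drop (cur + 1)).idxOf 1 + 1) =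
          xs.drop (cur + 1 + (xs.drop (cur + 1)).idxOf 1 + 1) := by
        rw [List.drop_drop]
        congr 1
      rw [ih (pvNext xs cur) hle, pvOnes_of_mem (cur + 1) hmem, hnext, hdd]
      simp [pvAltLoop]
    · have hnext : pvNext xs cur = xs.length := by simp [pvNext, hmem]
      have h2 : xs.drop (xs.length + 1) = [] :=
        List.drop_eq_nil_of_le (by omega)
      rw [ih (pvNext xs cur) (le_of_eq hnext), pvOnes_of_not_mem (cur + 1) hmem, hnext, h2]
      simp [pvAltLoop, pvOnes]

-- pvAltLoop with no rows left emits nothing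
lemma pvAltLoop_nil (pids : List Int) (n : Nat) : pvAltLoop pids [] n n = [] := by
  induction pids with
  | nil => rfl
  | cons p rest ih => simp [pvAltLoop, ih]

lemma pv_drop_cons {pids : List Int} {k : Nat} (hk : k < pids.length) :
    pids.drop k = pids.getD k 0 :: pids.drop (k + 1) := by
  rw [List.drop_eq_getElem_cons hk, List.getD_eq_getElem _ _ hk]

-- peeling one row off a segment-shaped tail
lemma pvAlt_cons_step (p : Int) (rest : List Int) (ones : List Nat) (i n : Nat)
    (hones : ∀ o ∈ ones, i + 1 ≤ o) (hn : i + 1 ≤ n) :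
    pvAltLoop (p :: rest) ones i n = p :: pvAltLoop (p :: rest) ones (i + 1) n := by
  cases ones with
  | nil =>
    have h1 : n - i = (n - (i + 1)) + 1 := by omega
    simp only [pvAltLoop, h1, List.replicate_succ, List.cons_append]
  | cons o os =>
    have ho : i + 1 ≤ o := hones o (List.mem_cons_self)
    have h1 : o - i = (o - (i + 1)) + 1 := by omega
    simp only [pvAltLoop, h1, List.replicate_succ, List.cons_append]

-- the bridge: B's row loop from position i ≥ 1 inside segment k equals A's segment-shaped tail
lemma pv_bridge (pids : List Int) :
    ∀ (l : List Int) (i k : Nat), 1 ≤ i → k < pids.length →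
      pvBLoop pids (l.zipIdx i) k =
        pvAltLoop (pids.drop k) (pvOnes l i) i (i + l.length) := by
  intro l
  induction l with
  | nil =>
    intro i k _ hk
    rw [pv_drop_cons hk]
    simp [pvBLoop, pvOnes, pvAltLoop_nil]
  | cons v t ih =>
    intro i k hi hk
    rw [List.zipIdx_cons]
    by_cases hv : v = 1
    · have hcond : (0 < i ∧ v = 1) := ⟨by omega, hv⟩
      simp only [pvBLoop, if_pos hcond]
      rw [pvOnes, if_pos hv, pv_drop_cons hk]
      simp only [pvAltLoop, Nat.sub_self, List.replicate_zero, List.nil_append]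
      by_cases hk1 : k + 1 < pids.length
      · rw [if_pos hk1, ih (i + 1) (k + 1) (by omega) hk1, pv_drop_cons hk1]
        have hn : i + (v :: t).length = (i + 1) + t.length := by
          simp only [List.length_cons]; omega
        rw [hn, pvAlt_cons_step _ _ _ i ((i + 1) + t.length)
            (fun o ho => pvOnes_ge ho) (by omega)]
      · rw [if_neg hk1]
        have hdrop : pids.drop (k + 1) = [] := List.drop_eq_nil_of_le (by omega)
        rw [hdrop]
        rfl
    · have hcond : ¬ (0 < i ∧ v = 1) := by intro h; exact hv h.2
      simp only [pvBLoop, if_neg hcond, if_pos hk]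
      rw [pvOnes, if_neg hv, ih (i + 1) k (by omega) hk, pv_drop_cons hk]
      have hn : i + (v :: t).length = (i + 1) + t.length := by
        simp only [List.length_cons]; omega
      rw [hn, pvAlt_cons_step _ _ _ i ((i + 1) + t.length)
          (fun o ho => pvOnes_ge ho) (by omega)]

-- ===== VERDICT (by name: the statement is the Claim_ definition above) =====
theorem gen_index_plt_list_py_spec : Claim_equal_gen_index_plt_list_py := by
  intro pids xs _
  simp only [Spec_gen_index_plt_list_py, gen_index_plt_list_py, gen_index_plt_list_py_alt]
  rw [pv_loopA xs pids 0 (Nat.zero_le _)]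
  cases xs with
  | nil =>
    simp [pvOnes, pvBLoop, pvAltLoop_nil]
  | cons x t =>
    rw [List.zipIdx_cons]
    have hcond : ¬ (0 < 0 ∧ x = 1) := by omega
    simp only [pvBLoop, if_neg hcond]
    by_cases hP : 0 < pids.length
    · rw [if_pos hP, pv_bridge pids t 1 0 (by omega) hP]
      have hd : (x :: t).drop (0 + 1) = t := rfl
      have hpc : pids.drop 0 = pids.getD 0 0 :: pids.drop (0 + 1) := pv_drop_cons hP
      have hpc' : pids = pids.getD 0 0 :: pids.drop (0 + 1) := by
        simpa using hpc
      rw [hd, hpc]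
      conv_lhs => rw [hpc']
      have hn : (x :: t).length = 1 + t.length := by
        simp only [List.length_cons]; omega
      rw [hn, pvAlt_cons_step _ _ _ 0 (1 + t.length) (fun o ho => pvOnes_ge ho) (by omega)]
    · rw [if_neg hP]
      have : pids = [] := List.eq_nil_of_length_eq_zero (by omega)
      subst this
      rfl
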